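-- pv_equiv track=rewrite | github.com/kgw7401/programmers-algorithm | ch8/징검다리 건너기.py | solution
-- ===== SOURCE A (Python) =====
-- def solution(stones, k):
--     answer = 0
--
--     start, end = 0, max(stones)
--
--     while start <= end:
--         mid = (start + end) // 2
--
--         first_zero = 0
--         available = True
--         for i in range(len(stones)):
--             if stones[i] - mid < 0:
--                 first_zero += 1
--                 if first_zero >= k:
--                     available = False
--                     break
--             else:
--                 first_zero = 0
--
--         if available:
--             answer = mid
--             start = mid + 1
--         else:
--             end = mid - 1
--
--     return answer
-- ===== SOURCE B (Python) =====
-- def solution(stones, k):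
--     # O(n) block-decomposition sliding-window maxima instead of A's binary search on the answer.
--     n = len(stones)
--     m = max(stones)
--     if k > n:
--         # no full window of k stones exists: only the value cap applies
--         return m if m > 0 else 0
--     # running prefix maxima within blocks of size k
--     pre = []
--     run = 0
--     for i in range(n):
--         run = stones[i] if i % k == 0 else max(run, stones[i])
--         pre.append(run)
--     # running suffix maxima within blocks of size k
--     suf = [0] * n
--     run = 0
--     for i in range(n - 1, -1, -1):
--         run = stones[i] if i % k == k - 1 or i == n - 1 else max(run, stones[i])
--         suf[i] = run
--     # max of window [j, j+k-1] = max(suf[j], pre[j+k-1]) (a window spans at most two blocks)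
--     w = min(max(suf[j], pre[j + k - 1]) for j in range(n - k + 1))
--     return w if w > 0 else 0
-- ===== Notes on version B (the rewrite author's own statement) =====
-- stated objective: faster
-- what changed: Replaces A's binary search on the answer (each probe rescanning all stones for a k-run of too-small stones) by a direct O(n) computation: per-block prefix/suffix running maxima give each size-k sliding-window maximum, and the answer is the minimum of these window maxima clamped to [0, max(stones)].
-- outside the precondition, e.g. on solution([5], 0): A returns 5, B raises ZeroDivisionError; on solution([5], -2): A returns 5, B raises IndexError
import Mathlib
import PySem

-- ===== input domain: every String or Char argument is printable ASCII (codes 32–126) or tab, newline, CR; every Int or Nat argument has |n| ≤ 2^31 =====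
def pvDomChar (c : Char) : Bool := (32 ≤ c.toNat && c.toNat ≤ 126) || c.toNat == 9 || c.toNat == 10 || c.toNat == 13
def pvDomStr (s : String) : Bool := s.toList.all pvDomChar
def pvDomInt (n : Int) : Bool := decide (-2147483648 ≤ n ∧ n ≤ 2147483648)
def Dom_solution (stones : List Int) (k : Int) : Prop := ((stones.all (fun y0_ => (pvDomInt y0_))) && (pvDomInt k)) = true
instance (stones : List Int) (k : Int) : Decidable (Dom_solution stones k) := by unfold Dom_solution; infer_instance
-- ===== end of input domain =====

-- B replaces A's binary search on the answer by an O(n) block-decomposition sliding-window-maximum pass (objective: faster).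

-- ===== PORT A =====
-- A's inner for-loop: counts consecutive stones below mid, breaks (returns false) once the count reaches k
def aLoop (k mid : Int) (fz : Int) : List Int → Bool
  | [] => true
  | x :: rest =>
    if x - mid < 0 then
      if fz + 1 ≥ k then false else aLoop k mid (fz + 1) rest
    else aLoop k mid 0 rest

-- A's while start <= end binary search
def aBS (stones : List Int) (k : Int) (answer start stop : Int) : Int :=
  if _h : start ≤ stop then
    let mid := PySem.Int.floordiv (start + stop) 2
    if aLoop k mid 0 stones then aBS stones k mid (mid + 1) stop
    else aBS stones k answer start (mid - 1)
  else answer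
termination_by (stop + 1 - start).toNat
decreasing_by
  all_goals
    have hb := PySem.Int.floordiv_two_mid_bounds _h
    omega

def solution (stones : List Int) (k : Int) : Int :=
  aBS stones k 0 0 ((PySem.List.max? stones (fun y => y)).getD 0)

-- ===== PORT B =====
-- Source B's first loop: running prefix maximum within each block of size k (run carried, values appended in order)
def bPre (k : Int) (i : Nat) (run : Int) : List Int → List Int
  | [] => []
  | x :: rest =>
    let run' := if PySem.Int.mod (Int.ofNat i) k = 0 then x else max run x
    run' :: bPre k (i + 1) run' rest

-- Source B's second loop (right-to-left): running suffix maximum within each block of size k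
def bSuf (k : Int) (n : Nat) (i : Nat) : List Int → List Int
  | [] => []
  | x :: rest =>
    let tail := bSuf k n (i + 1) rest
    let run' := if PySem.Int.mod (Int.ofNat i) k = k - 1 ∨ i = n - 1 then x
                else max (tail.headD 0) x
    run' :: tail

def solution_alt (stones : List Int) (k : Int) : Int :=
  let n := stones.length
  let m := (PySem.List.max? stones (fun y => y)).getD 0
  if k > (n : Int) then (if m > 0 then m else 0)
  else
    let kn := k.toNat
    let pre := bPre k 0 0 stones
    let suf := bSuf k n 0 stones
    let w := ((PySem.List.min?
      (((List.range (n - kn + 1)).map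
        (fun j => max (suf.getD j 0) (pre.getD (j + kn - 1) 0))))
      (fun y => y)).getD 0)
    if w > 0 then w else 0

-- ===== PRECONDITION & SPEC =====
-- Pre_ excludes stones = [] (A's max([]) raises ValueError) and k ≤ 0, a meaningless
-- jump count on which A's returned value (it behaves exactly as k = 1) is accidental
-- and B's block arithmetic raises (ZeroDivisionError / IndexError).
def Pre_solution (stones : List Int) (k : Int) : Prop := stones ≠ [] ∧ 1 ≤ k
instance (stones : List Int) (k : Int) : Decidable (Pre_solution stones k) := by
  unfold Pre_solution; infer_instance
def pvWitness_solution : List Int × Int := ([2, 4, 1, 3], 2)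

def Spec_solution (stones : List Int) (k : Int) (out : Int) : Prop := out = solution_alt stones k
instance (stones : List Int) (k : Int) (out : Int) : Decidable (Spec_solution stones k out) := by unfold Spec_solution; infer_instance

-- ===== CLAIM (what is proved, stated in full; the proofs are below) =====
def Claim_equal_solution : Prop := ∀ (stones : List Int) (k : Int), Dom_solution stones k → Pre_solution stones k → Spec_solution stones k (solution stones k)

-- ===== LEMMAS AND PROOFS =====

-- max/min of a nonempty list as the running fold (matches Python's max()/min())
def sMax : List Int → Int
  | [] => 0
  | x :: r => r.foldl max x

def sMin : List Int → Int
  | [] => 0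
  | x :: r => r.foldl min x

-- the slice stones[a:b] for 0 ≤ a ≤ b
def slc (l : List Int) (a b : Nat) : List Int := (l.drop a).take (b - a)

-- window max / overall min of window maxima (the mathematical value both sides compute)
def wmax (stones : List Int) (kn j : Nat) : Int := sMax (slc stones j (j + kn))

def Wval (stones : List Int) (kn : Nat) : Int :=
  sMin ((List.range (stones.length - kn + 1)).map (wmax stones kn))

theorem foldl_max_lt (r : List Int) (a m : Int) :
    r.foldl max a < m ↔ a < m ∧ ∀ x ∈ r, x < m := by
  induction r generalizing a with
  | nil => simp
  | cons y t ih =>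
    simp [List.foldl, ih]
    tauto

theorem foldl_max_le (r : List Int) (a m : Int) :
    r.foldl max a ≤ m ↔ a ≤ m ∧ ∀ x ∈ r, x ≤ m := by
  induction r generalizing a with
  | nil => simp
  | cons y t ih =>
    simp [List.foldl, ih]
    tauto

theorem le_foldl_min (r : List Int) (a m : Int) :
    m ≤ r.foldl min a ↔ m ≤ a ∧ ∀ x ∈ r, m ≤ x := by
  induction r generalizing a with
  | nil => simp
  | cons y t ih =>
    simp [List.foldl, ih]
    tauto

theorem sMax_lt_iff (l : List Int) (h : l ≠ []) (m : Int) :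
    sMax l < m ↔ ∀ x ∈ l, x < m := by
  cases l with
  | nil => exact absurd rfl h
  | cons x r => simp [sMax, foldl_max_lt]

theorem sMax_le_iff (l : List Int) (h : l ≠ []) (m : Int) :
    sMax l ≤ m ↔ ∀ x ∈ l, x ≤ m := by
  cases l with
  | nil => exact absurd rfl h
  | cons x r => simp [sMax, foldl_max_le]

theorem le_sMin_iff (l : List Int) (h : l ≠ []) (m : Int) :
    m ≤ sMin l ↔ ∀ x ∈ l, m ≤ x := by
  cases l with
  | nil => exact absurd rfl h
  | cons x r => simp [sMin, le_foldl_min]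

theorem sMin_le_of_mem {l : List Int} {x : Int} (h : x ∈ l) : sMin l ≤ x := by
  by_contra hc
  push Not at hc
  have := (le_sMin_iff l (by rintro rfl; simp at h) (x + 1)).mp (by omega) x h
  omega

theorem foldl_max_comm (u : List Int) (a y : Int) :
    u.foldl max (max a y) = max a (u.foldl max y) := by
  induction u generalizing a y with
  | nil => simp
  | cons z w ih => simp [List.foldl, max_assoc, ih]

theorem sMax_cons (x : Int) (t : List Int) (ht : t ≠ []) :
    sMax (x :: t) = max x (sMax t) := by
  cases t with
  | nil => exact absurd rfl ht
  | cons y u => simp [sMax, List.foldl, foldl_max_comm]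

theorem sMax_append (s t : List Int) (hs : s ≠ []) (ht : t ≠ []) :
    sMax (s ++ t) = max (sMax s) (sMax t) := by
  induction s with
  | nil => exact absurd rfl hs
  | cons x r ih =>
    cases r with
    | nil => simpa using sMax_cons x t ht
    | cons y u =>
      rw [List.cons_append, sMax_cons x _ (by simp), sMax_cons x (y :: u) (by simp),
        ih (by simp), max_assoc]

theorem le_sMax_of_mem {l : List Int} {x : Int} (h : x ∈ l) : x ≤ sMax l := by
  have := (sMax_le_iff l (by rintro rfl; simp at h) (sMax l)).mp le_rfl
  exact this x h

-- slices
theorem slc_split (l : List Int) (a b c : Nat) (hab : a ≤ b) (hbc : b ≤ c) :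
    slc l a c = slc l a b ++ slc l b c := by
  unfold slc
  have h1 : c - a = (b - a) + (c - b) := by omega
  rw [h1, List.take_add, List.drop_drop]
  have h2 : a + (b - a) = b := by omega
  rw [h2]

theorem slc_len (l : List Int) (a b : Nat) :
    (slc l a b).length = min (b - a) (l.length - a) := by
  simp [slc]

theorem slc_ne_nil (l : List Int) (a b : Nat) (h1 : a < b) (h2 : a < l.length) :
    slc l a b ≠ [] := by
  have := slc_len l a b
  intro hc
  rw [hc] at this
  simp at this
  omega

theorem slc_cons (l : List Int) (a b : Nat) (h1 : a < b) (h2 : a < l.length) :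
    slc l a b = l.getD a 0 :: slc l (a + 1) b := by
  unfold slc
  rw [List.drop_eq_getElem_cons h2]
  have h3 : b - a = (b - (a + 1)) + 1 := by omega
  rw [h3, List.take_succ_cons]
  simp [List.getD, List.getElem?_eq_getElem h2]

theorem slc_singleton (l : List Int) (a : Nat) (h2 : a < l.length) :
    slc l a (a + 1) = [l.getD a 0] := by
  rw [slc_cons l a (a+1) (by omega) h2]
  simp [slc]

theorem mem_slc_mem {l : List Int} {a b : Nat} {x : Int} (h : x ∈ slc l a b) : x ∈ l := by
  unfold slc at h
  exact List.mem_of_mem_drop (List.mem_of_mem_take h)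

-- PySem max with identity key is the running max
theorem pyMax_getD (l : List Int) (h : l ≠ []) :
    (PySem.List.max? l (fun y => y)).getD 0 = sMax l := by
  cases l with
  | nil => exact absurd rfl h
  | cons x r => simp [PySem.List.max?_id_cons, sMax]

theorem pyMin_getD (l : List Int) (h : l ≠ []) :
    (PySem.List.min? l (fun y => y)).getD 0 = sMin l := by
  cases l with
  | nil => exact absurd rfl h
  | cons x r => simp [PySem.List.min?_id_cons, sMin]

def allLt (m : Int) (l : List Int) : Prop := ∀ x ∈ l, x < m

def hasRun (stones : List Int) (kn : Nat) (m : Int) : Prop :=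
  ∃ j, j + kn ≤ stones.length ∧ allLt m (slc stones j (j + kn))

theorem slc_cons_shift (x : Int) (l : List Int) (a b : Nat) :
    slc (x :: l) (a + 1) (b + 1) = slc l a b := by
  simp [slc, Nat.succ_sub_succ]

theorem allLt_take_mono {m : Int} {l : List Int} {b c : Nat} (hbc : b ≤ c)
    (h : allLt m (l.take c)) : allLt m (l.take b) := by
  intro x hx
  have he : l.take b = (l.take c).take b := by
    rw [List.take_take, Nat.min_eq_left hbc]
  rw [he] at hx
  exact h x (List.mem_of_mem_take hx)

theorem aLoop_false_iff (k m : Int) (hk : 1 ≤ k) :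
    ∀ (l : List Int) (fz : Int), 0 ≤ fz → fz < k →
    (aLoop k m fz l = false ↔
      (((k - fz).toNat ≤ l.length ∧ allLt m (l.take (k - fz).toNat)) ∨
       ∃ j, j + k.toNat ≤ l.length ∧ allLt m (slc l j (j + k.toNat)))) := by
  intro l
  induction l with
  | nil =>
    intro fz h0 h1
    simp only [aLoop, List.length_nil]
    constructor
    · intro h; exact absurd h (by simp)
    · rintro (⟨h2, _⟩ | ⟨j, hj, _⟩) <;> omega
  | cons x rest ih =>
    intro fz h0 h1
    simp only [aLoop]
    by_cases hx : x - m < 0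
    · rw [if_pos hx]
      by_cases hge : fz + 1 ≥ k
      · rw [if_pos hge]
        have hc : (k - fz).toNat = 1 := by omega
        constructor
        · intro _
          left
          refine ⟨by simp [hc], ?_⟩
          rw [hc]
          intro y hy
          simp at hy
          omega
        · intro _; rfl
      · rw [if_neg hge]
        rw [ih (fz + 1) (by omega) (by omega)]
        have hc : (k - fz).toNat = (k - (fz + 1)).toNat + 1 := by omega
        constructor
        · rintro (⟨h2, h3⟩ | ⟨j, hj1, hj2⟩)
          · left
            refine ⟨by simp; omega, ?_⟩
            rw [hc, List.take_succ_cons]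
            intro y hy
            rcases List.mem_cons.mp hy with rfl | hy'
            · omega
            · exact h3 y hy'
          · right
            exact ⟨j + 1, by simp; omega, by
              have : j + 1 + k.toNat = (j + k.toNat) + 1 := by omega
              rw [this, slc_cons_shift]
              exact hj2⟩
        · rintro (⟨h2, h3⟩ | ⟨j, hj1, hj2⟩)
          · left
            rw [hc, List.take_succ_cons] at h3
            refine ⟨by simp at h2; omega, ?_⟩
            intro y hy
            exact h3 y (List.mem_cons_of_mem x hy)
          · cases j with
            | zero =>
              left
              simp only [Nat.zero_add] at hj1 hj2
              have hkn : 1 ≤ k.toNat := by omega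
              have hsl : slc (x :: rest) 0 (k.toNat) = x :: rest.take (k.toNat - 1) := by
                have h4 : k.toNat = (k.toNat - 1) + 1 := by omega
                rw [h4]
                simp [slc, List.take_succ_cons]
              rw [hsl] at hj2
              simp at hj1
              refine ⟨by omega, ?_⟩
              apply allLt_take_mono (c := k.toNat - 1) (by omega)
              intro y hy
              exact hj2 y (List.mem_cons_of_mem x hy)
            | succ j' =>
              right
              refine ⟨j', by simp at hj1; omega, ?_⟩
              have : j' + 1 + k.toNat = (j' + k.toNat) + 1 := by omega
              rw [this, slc_cons_shift] at hj2
              exact hj2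
    · rw [if_neg hx]
      have hxm : m ≤ x := by omega
      rw [ih 0 (by omega) (by omega)]
      constructor
      · rintro (⟨h2, h3⟩ | ⟨j, hj1, hj2⟩)
        · right
          refine ⟨1, by simp; omega, ?_⟩
          have h4 : (1 : Nat) + k.toNat = (0 + k.toNat) + 1 := by omega
          rw [h4, slc_cons_shift]
          have h5 : (k - 0).toNat = k.toNat := by omega
          rw [h5] at h3
          simpa [slc] using h3
        · right
          refine ⟨j + 1, by simp; omega, ?_⟩
          have : j + 1 + k.toNat = (j + k.toNat) + 1 := by omega
          rw [this, slc_cons_shift]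
          exact hj2
      · rintro (⟨h2, h3⟩ | ⟨j, hj1, hj2⟩)
        · exfalso
          have hx1 : x ∈ (x :: rest).take (k - fz).toNat := by
            have h4 : (k - fz).toNat = ((k - fz).toNat - 1) + 1 := by omega
            rw [h4, List.take_succ_cons]
            exact List.mem_cons_self
          have := h3 x hx1
          omega
        · cases j with
          | zero =>
            exfalso
            simp only [Nat.zero_add] at hj1 hj2
            have hx1 : x ∈ slc (x :: rest) 0 k.toNat := by
              have h4 : k.toNat = (k.toNat - 1) + 1 := by omega
              rw [h4]
              simp [slc, List.take_succ_cons]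
            have := hj2 x hx1
            omega
          | succ j' =>
            right
            refine ⟨j', by simp at hj1; omega, ?_⟩
            have : j' + 1 + k.toNat = (j' + k.toNat) + 1 := by omega
            rw [this, slc_cons_shift] at hj2
            exact hj2


theorem aLoop_true_iff (stones : List Int) (k m : Int) (hk : 1 ≤ k) :
    (aLoop k m 0 stones = true) ↔ ¬ hasRun stones k.toNat m := by
  rw [← Bool.not_eq_false, not_iff_not, aLoop_false_iff k m hk stones 0 (by omega) (by omega)]
  unfold hasRun
  constructor
  · rintro (⟨h1, h2⟩ | h)
    · exact ⟨0, by simpa using h1, by simpa [slc] using h2⟩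
    · exact h
  · rintro ⟨j, hj1, hj2⟩
    right
    exact ⟨j, hj1, hj2⟩

theorem sMin_lt_iff (l : List Int) (h : l ≠ []) (m : Int) :
    sMin l < m ↔ ∃ x ∈ l, x < m := by
  rw [← not_le, le_sMin_iff l h]
  push Not
  rfl

theorem hasRun_iff_lt (stones : List Int) (kn : Nat) (m : Int) (hkn : 1 ≤ kn)
    (hn : kn ≤ stones.length) :
    hasRun stones kn m ↔ Wval stones kn < m := by
  unfold Wval
  rw [sMin_lt_iff _ (by simp [List.range_eq_nil])]
  constructor
  · rintro ⟨j, hj1, hj2⟩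
    refine ⟨wmax stones kn j, List.mem_map_of_mem (by simp; omega), ?_⟩
    rw [wmax, sMax_lt_iff _ (slc_ne_nil _ _ _ (by omega) (by omega))]
    exact hj2
  · rintro ⟨x, hx1, hx2⟩
    rcases List.mem_map.mp hx1 with ⟨j, hj1, rfl⟩
    simp only [List.mem_range] at hj1
    rw [wmax, sMax_lt_iff _ (slc_ne_nil _ _ _ (by omega) (by omega))] at hx2
    exact ⟨j, by omega, hx2⟩

theorem avail_iff_le (stones : List Int) (k : Int) (hk : 1 ≤ k)
    (hkn : k.toNat ≤ stones.length) (m : Int) :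
    (aLoop k m 0 stones = true) ↔ m ≤ Wval stones k.toNat := by
  rw [aLoop_true_iff stones k m hk, hasRun_iff_lt stones k.toNat m (by omega) hkn, not_lt]

theorem aBS_eq (stones : List Int) (k W : Int)
    (hav : ∀ m, (aLoop k m 0 stones = true) ↔ m ≤ W) :
    ∀ (μ : Nat) (ans start stop : Int), (stop + 1 - start).toNat ≤ μ → W ≤ stop →
      ((start = 0 ∧ ans = 0) ∨ (1 ≤ start ∧ ans = start - 1 ∧ ans ≤ W)) →
      aBS stones k ans start stop = max 0 W := by
  intro μ
  induction μ with
  | zero =>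
    intro ans start stop hμ hWe hinv
    rw [aBS, dif_neg (by omega)]
    rcases hinv with ⟨rfl, rfl⟩ | ⟨h1, h2, h3⟩
    · omega
    · omega
  | succ μ ih =>
    intro ans start stop hμ hWe hinv
    rw [aBS]
    by_cases h : start ≤ stop
    · have hb := PySem.Int.floordiv_two_mid_bounds h
      have hs0 : 0 ≤ start := by rcases hinv with ⟨rfl, _⟩ | ⟨h1, _, _⟩ <;> omega
      simp only [dif_pos h]
      by_cases ha : aLoop k (PySem.Int.floordiv (start + stop) 2) 0 stones = true
      · rw [if_pos ha]
        have hmW := (hav _).mp ha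
        exact ih _ _ _ (by omega) hWe (Or.inr ⟨by omega, by omega, hmW⟩)
      · rw [if_neg ha]
        have hmW : ¬ (PySem.Int.floordiv (start + stop) 2 ≤ W) := fun hc => ha ((hav _).mpr hc)
        exact ih _ _ _ (by omega) (by omega) hinv
    · rw [dif_neg h]
      rcases hinv with ⟨rfl, rfl⟩ | ⟨h1, h2, h3⟩
      · omega
      · omega

theorem aBS_all (stones : List Int) (k : Int)
    (hall : ∀ m, aLoop k m 0 stones = true) :
    ∀ (μ : Nat) (ans start stop : Int), (stop + 1 - start).toNat ≤ μ →
      ((start = 0 ∧ ans = 0) ∨ (1 ≤ start ∧ ans = start - 1 ∧ ans ≤ stop)) →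
      aBS stones k ans start stop = max ans stop := by
  intro μ
  induction μ with
  | zero =>
    intro ans start stop hμ hinv
    rw [aBS, dif_neg (by omega)]
    rcases hinv with ⟨rfl, rfl⟩ | ⟨h1, h2, h3⟩ <;> omega
  | succ μ ih =>
    intro ans start stop hμ hinv
    rw [aBS]
    by_cases h : start ≤ stop
    · have hb := PySem.Int.floordiv_two_mid_bounds h
      have hs0 : 0 ≤ start := by rcases hinv with ⟨rfl, _⟩ | ⟨h1, _, _⟩ <;> omega
      simp only [dif_pos h]
      rw [if_pos (hall _)]
      have := ih (PySem.Int.floordiv (start + stop) 2) (PySem.Int.floordiv (start + stop) 2 + 1)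
        stop (by omega) (Or.inr ⟨by omega, by omega, by omega⟩)
      rw [this]
      omega
    · rw [dif_neg h]
      rcases hinv with ⟨rfl, rfl⟩ | ⟨h1, h2, h3⟩ <;> omega

def preSpec (stones : List Int) (kn : Nat) (i : Nat) : Int :=
  sMax (slc stones ((i / kn) * kn) (i + 1))

def sufSpec (stones : List Int) (kn : Nat) (i : Nat) : Int :=
  sMax (slc stones i (min ((i / kn + 1) * kn) stones.length))

theorem pymod_eq (i : Nat) (k : Int) (hk : 1 ≤ k) :
    PySem.Int.mod (Int.ofNat i) k = ((i % k.toNat : Nat) : Int) := by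
  have hc : ((k.toNat : Nat) : Int) = k := by omega
  rw [Int.ofNat_eq_natCast]
  calc PySem.Int.mod (↑i) k = PySem.Int.mod (↑i) ((k.toNat : Nat) : Int) := by rw [hc]
    _ = ((i % k.toNat : Nat) : Int) := PySem.Int.mod_natCast i k.toNat

theorem drop_head_getD {stones t : List Int} {x : Int} {i0 : Nat}
    (h : stones.drop i0 = x :: t) : stones.getD i0 0 = x ∧ stones.drop (i0 + 1) = t := by
  constructor
  · have h0 : (stones.drop i0)[0]? = some x := by rw [h]; rfl
    rw [List.getElem?_drop] at h0
    simp only [Nat.add_zero] at h0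
    simp [List.getD, h0]
  · have h3 : List.drop 1 (stones.drop i0) = t := by rw [h]; rfl
    rw [List.drop_drop] at h3
    simpa [Nat.add_comm] using h3

theorem headD_eq_getD (l : List Int) : l.headD 0 = l.getD 0 0 := by
  cases l <;> rfl

theorem bPre_getD (stones : List Int) (k : Int) (hk : 1 ≤ k) :
    ∀ (rest : List Int) (i0 : Nat) (run : Int),
      stones.drop i0 = rest →
      (i0 % k.toNat ≠ 0 → run = preSpec stones k.toNat (i0 - 1)) →
      ∀ j < rest.length, (bPre k i0 run rest).getD j 0 = preSpec stones k.toNat (i0 + j) := by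
  intro rest
  induction rest with
  | nil => intro _ _ _ _ j hj; simp at hj
  | cons x t ih =>
    intro i0 run hdrop hrun j hj
    obtain ⟨hx, ht⟩ := drop_head_getD hdrop
    have hi0lt : i0 < stones.length := by
      have := congrArg List.length hdrop
      simp at this
      omega
    set kn := k.toNat with hkn
    have hkn1 : 1 ≤ kn := by omega
    -- value computed at index i0
    have hval : (if PySem.Int.mod (Int.ofNat i0) k = 0 then x else max run x)
        = preSpec stones kn i0 := by
      rw [pymod_eq i0 k hk]
      simp only [Nat.cast_eq_zero]
      by_cases hm : i0 % kn = 0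
      · rw [if_pos hm]
        have hdm := Nat.div_add_mod i0 kn
        have hbs : i0 / kn * kn = i0 := by
          have : kn * (i0 / kn) = i0 / kn * kn := Nat.mul_comm _ _
          omega
        rw [preSpec, hbs, slc_singleton stones i0 hi0lt, hx]
        rfl
      · rw [if_neg hm]
        rw [hrun hm]
        have hdm := Nat.div_add_mod i0 kn
        have hr1 : 1 ≤ i0 % kn := by omega
        have hrk : i0 % kn < kn := Nat.mod_lt _ (by omega)
        -- (i0 - 1) / kn = i0 / kn
        have hq : (i0 - 1) / kn = i0 / kn := by
          have h1 : i0 - 1 = kn * (i0 / kn) + (i0 % kn - 1) := by omega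
          rw [h1, Nat.mul_add_div (by omega)]
          have : (i0 % kn - 1) / kn = 0 := Nat.div_eq_of_lt (by omega)
          omega
        have hble : i0 / kn * kn ≤ i0 - 1 := by
          have : kn * (i0 / kn) = i0 / kn * kn := Nat.mul_comm _ _
          omega
        rw [preSpec, preSpec, hq]
        have hi1 : i0 - 1 + 1 = i0 := by omega
        rw [hi1]
        rw [slc_split stones (i0 / kn * kn) i0 (i0 + 1) (by omega) (by omega),
          slc_singleton stones i0 hi0lt, hx]
        rw [sMax_append _ _ (slc_ne_nil _ _ _ (by omega) (by omega)) (by simp)]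
        simp [sMax]
    have hunf : bPre k i0 run (x :: t)
        = (if PySem.Int.mod (Int.ofNat i0) k = 0 then x else max run x)
          :: bPre k (i0 + 1) (if PySem.Int.mod (Int.ofNat i0) k = 0 then x else max run x) t := rfl
    rw [hunf]
    cases j with
    | zero => simpa using hval
    | succ j' =>
      have hj' : j' < t.length := by simp at hj; omega
      have := ih (i0 + 1) (if PySem.Int.mod (Int.ofNat i0) k = 0 then x else max run x) ht
        (fun _ => by rw [hval]; simp) j' hj'
      simpa [Nat.add_assoc, Nat.add_comm 1 j'] using this

theorem bSuf_getD (stones : List Int) (k : Int) (hk : 1 ≤ k) :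
    ∀ (rest : List Int) (i0 : Nat),
      stones.drop i0 = rest →
      ∀ j < rest.length, (bSuf k stones.length i0 rest).getD j 0
        = sufSpec stones k.toNat (i0 + j) := by
  intro rest
  induction rest with
  | nil => intro _ _ j hj; simp at hj
  | cons x t ih =>
    intro i0 hdrop j hj
    obtain ⟨hx, ht⟩ := drop_head_getD hdrop
    have hlen : t.length = stones.length - (i0 + 1) := by
      have := congrArg List.length hdrop
      simp at this
      omega
    have hi0lt : i0 < stones.length := by
      have := congrArg List.length hdrop
      simp at this
      omega
    set kn := k.toNat with hkn
    have hkn1 : 1 ≤ kn := by omega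
    have hrk : i0 % kn < kn := Nat.mod_lt _ (by omega)
    have hdm := Nat.div_add_mod i0 kn
    have hbe : i0 + 1 ≤ (i0 / kn + 1) * kn := by
      have : (i0 / kn + 1) * kn = i0 / kn * kn + kn := by ring
      have h2 : kn * (i0 / kn) = i0 / kn * kn := Nat.mul_comm _ _
      omega
    have hval : (if PySem.Int.mod (Int.ofNat i0) k = k - 1 ∨ i0 = stones.length - 1 then x
        else max ((bSuf k stones.length (i0 + 1) t).headD 0) x) = sufSpec stones kn i0 := by
      rw [pymod_eq i0 k hk]
      by_cases hc : (((i0 % kn : Nat) : Int) = k - 1 ∨ i0 = stones.length - 1)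
      · rw [if_pos hc]
        have hE : min ((i0 / kn + 1) * kn) stones.length = i0 + 1 := by
          rcases hc with hc | hc
          · have hm : i0 % kn = kn - 1 := by omega
            have : (i0 / kn + 1) * kn = i0 / kn * kn + kn := by ring
            have h2 : kn * (i0 / kn) = i0 / kn * kn := Nat.mul_comm _ _
            omega
          · omega
        rw [sufSpec, hE, slc_singleton stones i0 hi0lt, hx]
        rfl
      · rw [if_neg hc]
        push Not at hc
        obtain ⟨hc1, hc2⟩ := hc
        have hm : i0 % kn ≤ kn - 2 := by omega
        have hlt : i0 + 1 < stones.length := by omega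
        have htne : t ≠ [] := by
          intro hte
          rw [hte] at hlen
          simp at hlen
          omega
        have hbe2 : i0 + 2 ≤ (i0 / kn + 1) * kn := by
          have : (i0 / kn + 1) * kn = i0 / kn * kn + kn := by ring
          have h2 : kn * (i0 / kn) = i0 / kn * kn := Nat.mul_comm _ _
          omega
        have hq : (i0 + 1) / kn = i0 / kn := by
          have h1 : i0 + 1 = kn * (i0 / kn) + (i0 % kn + 1) := by omega
          rw [h1, Nat.mul_add_div (by omega)]
          have : (i0 % kn + 1) / kn = 0 := Nat.div_eq_of_lt (by omega)
          omega
        have hhead : (bSuf k stones.length (i0 + 1) t).headD 0 = sufSpec stones kn (i0 + 1) := by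
          rw [headD_eq_getD]
          have := ih (i0 + 1) ht 0 (by cases t with | nil => exact absurd rfl htne | cons a b => simp)
          simpa using this
        rw [hhead, sufSpec, sufSpec, hq]
        set E := min ((i0 / kn + 1) * kn) stones.length with hE
        have hE1 : i0 + 2 ≤ E := by omega
        rw [slc_cons stones i0 E (by omega) hi0lt]
        rw [sMax_cons _ _ (slc_ne_nil _ _ _ (by omega) (by omega)), hx]
        exact max_comm _ _
    have hunf : bSuf k stones.length i0 (x :: t)
        = (if PySem.Int.mod (Int.ofNat i0) k = k - 1 ∨ i0 = stones.length - 1 then x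
           else max ((bSuf k stones.length (i0 + 1) t).headD 0) x)
          :: bSuf k stones.length (i0 + 1) t := rfl
    rw [hunf]
    cases j with
    | zero => simpa using hval
    | succ j' =>
      have hj' : j' < t.length := by simp at hj; omega
      have := ih (i0 + 1) ht j' hj'
      simpa [Nat.add_assoc, Nat.add_comm 1 j'] using this

theorem window_split (stones : List Int) (kn : Nat) (hkn : 1 ≤ kn) (j : Nat)
    (hj : j + kn ≤ stones.length) :
    max (sufSpec stones kn j) (preSpec stones kn (j + kn - 1)) = wmax stones kn j := by
  have hdm := Nat.div_add_mod j kn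
  have hrk : j % kn < kn := Nat.mod_lt _ (by omega)
  have hmul : kn * (j / kn) = j / kn * kn := Nat.mul_comm _ _
  have hbe : (j / kn + 1) * kn = j / kn * kn + kn := by ring
  by_cases hr : j % kn = 0
  · -- window is exactly one block
    have hbs : j / kn * kn = j := by omega
    have hqe : (j + kn - 1) / kn = j / kn := by
      have h1 : j + kn - 1 = kn * (j / kn) + (kn - 1) := by omega
      rw [h1, Nat.mul_add_div (by omega)]
      have : (kn - 1) / kn = 0 := Nat.div_eq_of_lt (by omega)
      omega
    have h2 : j + kn - 1 + 1 = j + kn := by omega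
    rw [sufSpec, preSpec, wmax, hqe, hbs, h2]
    have hE : min ((j / kn + 1) * kn) stones.length = j + kn := by omega
    rw [hE, max_self]
  · -- window spans two adjacent blocks
    have hr1 : 1 ≤ j % kn := by omega
    have hbs : j / kn * kn = j - j % kn := by omega
    have hmid : (j / kn + 1) * kn = j + (kn - j % kn) := by omega
    have hqe : (j + kn - 1) / kn = j / kn + 1 := by
      have h1 : j + kn - 1 = kn * (j / kn + 1) + (j % kn - 1) := by ring_nf; omega
      rw [h1, Nat.mul_add_div (by omega)]
      have : (j % kn - 1) / kn = 0 := Nat.div_eq_of_lt (by omega)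
      omega
    have h2 : j + kn - 1 + 1 = j + kn := by omega
    rw [sufSpec, preSpec, wmax, hqe, h2, hmid]
    have hE : min (j + (kn - j % kn)) stones.length = j + (kn - j % kn) := by omega
    rw [hE]
    rw [slc_split stones j (j + (kn - j % kn)) (j + kn) (by omega) (by omega)]
    rw [sMax_append _ _ (slc_ne_nil _ _ _ (by omega) (by omega))
      (slc_ne_nil _ _ _ (by omega) (by omega))]

-- ===== VERDICT (by name: the statement is the Claim_ definition above) =====
theorem max_ite (M : Int) : (if M > 0 then M else 0) = max 0 M := by
  by_cases h : M > 0
  · rw [if_pos h, max_eq_right (by omega)]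
  · rw [if_neg h, max_eq_left (by omega)]

theorem solution_spec : Claim_equal_solution := by
  unfold Claim_equal_solution Spec_solution Pre_solution
  rintro stones k _hdom ⟨hne, hk⟩
  have hnn : 0 < stones.length := List.length_pos_iff.mpr hne
  have hM : (PySem.List.max? stones (fun y => y)).getD 0 = sMax stones := pyMax_getD stones hne
  by_cases hkn : k > (stones.length : Int)
  · -- k > n: no window of k stones exists; A's probe always succeeds
    have hall : ∀ m, aLoop k m 0 stones = true := by
      intro m
      rw [aLoop_true_iff stones k m hk]
      rintro ⟨j, hj1, _⟩
      omega
    have hA : solution stones k = max 0 (sMax stones) := by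
      simp only [solution]
      rw [hM]
      exact aBS_all stones k hall (sMax stones + 1 - 0).toNat 0 0 (sMax stones) (by omega)
        (Or.inl ⟨rfl, rfl⟩)
    have hB : solution_alt stones k = (if sMax stones > 0 then sMax stones else 0) := by
      simp only [solution_alt]
      rw [hM, if_pos hkn]
    rw [hA, hB, max_ite]
  · -- 1 ≤ k ≤ n: both sides compute max 0 (min of sliding-window maxima)
    have hkle : k.toNat ≤ stones.length := by omega
    have hkn1 : 1 ≤ k.toNat := by omega
    have hav := avail_iff_le stones k hk hkle
    have hWM : Wval stones k.toNat ≤ sMax stones := by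
      have h0 : wmax stones k.toNat 0 ∈
          (List.range (stones.length - k.toNat + 1)).map (wmax stones k.toNat) :=
        List.mem_map_of_mem (List.mem_range.mpr (by omega))
      have h1 := sMin_le_of_mem h0
      have h2 : wmax stones k.toNat 0 ≤ sMax stones := by
        rw [wmax, sMax_le_iff _ (slc_ne_nil _ _ _ (by omega) (by omega))]
        intro x hx
        exact le_sMax_of_mem (mem_slc_mem hx)
      calc Wval stones k.toNat ≤ wmax stones k.toNat 0 := h1
        _ ≤ sMax stones := h2
    have hA : solution stones k = max 0 (Wval stones k.toNat) := by
      simp only [solution]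
      rw [hM]
      exact aBS_eq stones k (Wval stones k.toNat) hav (sMax stones + 1 - 0).toNat 0 0
        (sMax stones) (by omega) hWM (Or.inl ⟨rfl, rfl⟩)
    have hmap : (List.range (stones.length - k.toNat + 1)).map
          (fun j => max ((bSuf k stones.length 0 stones).getD j 0)
            ((bPre k 0 0 stones).getD (j + k.toNat - 1) 0))
        = (List.range (stones.length - k.toNat + 1)).map (wmax stones k.toNat) := by
      apply List.map_congr_left
      intro j hj
      rw [List.mem_range] at hj
      have hjkn : j + k.toNat ≤ stones.length := by omega
      rw [bSuf_getD stones k hk stones 0 (by simp) j (by omega)]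
      rw [bPre_getD stones k hk stones 0 0 (by simp)
        (fun h => absurd (Nat.zero_mod k.toNat) h) (j + k.toNat - 1) (by omega)]
      simp only [Nat.zero_add]
      exact window_split stones k.toNat hkn1 j hjkn
    have hB : solution_alt stones k
        = (if Wval stones k.toNat > 0 then Wval stones k.toNat else 0) := by
      simp only [solution_alt]
      rw [if_neg hkn, hmap,
        pyMin_getD _ (by simp [List.range_eq_nil]), Wval]
    rw [hA, hB, max_ite]
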